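-- pv_equiv track=rewrite | github.com/httpsDr3aMy/little-projects | jsonplaceholder.py | most_user_points
-- ===== SOURCE A (Python) =====
-- def most_user_points(frequency_of_completed_tasks):
--     most_points = max(frequency_of_completed_tasks.values())
--     best_users = [
--     user
--     for user, max_points in frequency_of_completed_tasks.items()
--     if max_points == most_points
-- ]
--     return most_points,best_users
-- ===== SOURCE B (Python) =====
-- def most_user_points(frequency_of_completed_tasks):
--     best_points = None
--     best_users = None
--     for user, pts in frequency_of_completed_tasks.items():
--         if best_points is None or pts > best_points:
--             best_points = pts
--             best_users = [user]
--         elif pts == best_points: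
--             best_users.append(user)
--     if best_points is None:
--         raise ValueError("most_user_points() arg is an empty dict")
--     return best_points, best_users
-- ===== Notes on version B (the rewrite author's own statement) =====
-- stated objective: alternative
-- what changed: Replaces max() over values plus a second filtering pass over items() with one single-pass loop maintaining the running best score and its list of users.
import Mathlib
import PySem

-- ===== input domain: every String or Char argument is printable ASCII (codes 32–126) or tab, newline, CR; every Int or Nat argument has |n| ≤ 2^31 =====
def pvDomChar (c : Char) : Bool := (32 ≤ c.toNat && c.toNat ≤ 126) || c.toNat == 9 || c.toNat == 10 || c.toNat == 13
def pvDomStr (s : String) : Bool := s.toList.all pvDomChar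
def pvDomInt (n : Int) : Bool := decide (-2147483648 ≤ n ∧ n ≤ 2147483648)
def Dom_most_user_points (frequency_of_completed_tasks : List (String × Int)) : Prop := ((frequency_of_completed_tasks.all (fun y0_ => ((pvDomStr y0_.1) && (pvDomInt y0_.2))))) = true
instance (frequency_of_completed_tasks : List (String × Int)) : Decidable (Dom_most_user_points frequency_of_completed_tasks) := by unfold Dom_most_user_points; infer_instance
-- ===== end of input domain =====

-- B: one single-pass loop with a running (best_points, best_users) accumulator instead of max() followed by a filtering pass; equivalence of the return value on nonempty input (both raise/are excluded on empty).

-- ===== PORT A =====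
-- most_points = max(frequency_of_completed_tasks.values()); Pre_ excludes the empty dict, where max raises ValueError (.getD 0 is unreachable under Pre_)
def most_user_points (frequency_of_completed_tasks : List (String × Int)) : Int × List String :=
  let most_points : Int :=
    (PySem.List.max? (frequency_of_completed_tasks.map Prod.snd) (fun x => x)).getD 0
  let best_users : List String :=
    frequency_of_completed_tasks.foldl
      (fun acc p => if p.2 == most_points then acc ++ [p.1] else acc) []
  (most_points, best_users)

-- ===== PORT B =====
-- the loop body: state is none before the first item, some (best_points, best_users) after
def pvStepB (st : Option (Int × List String)) (p : String × Int) : Option (Int × List String) :=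
  match st with
  | none => some (p.2, [p.1])
  | some (b, us) =>
      if p.2 > b then some (p.2, [p.1])
      else if p.2 == b then some (b, us ++ [p.1])
      else some (b, us)

-- B raises ValueError on the empty dict (excluded by Pre_); (0, []) stands for that unreachable branch
def most_user_points_alt (frequency_of_completed_tasks : List (String × Int)) : Int × List String :=
  match frequency_of_completed_tasks.foldl pvStepB none with
  | none => (0, [])
  | some (b, us) => (b, us)

-- ===== PRECONDITION & SPEC =====
-- Pre_ excludes exactly the empty dict, where Python's max() (A) and B's explicit raise both throw ValueError
def Pre_most_user_points (frequency_of_completed_tasks : List (String × Int)) : Prop :=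
  frequency_of_completed_tasks ≠ []
instance (frequency_of_completed_tasks : List (String × Int)) : Decidable (Pre_most_user_points frequency_of_completed_tasks) := by unfold Pre_most_user_points; infer_instance
def pvWitness_most_user_points : (List (String × Int)) := [("alice", 3), ("bob", 5), ("carol", 5)]
def Spec_most_user_points (frequency_of_completed_tasks : List (String × Int)) (out : Int × List String) : Prop := out = most_user_points_alt frequency_of_completed_tasks
instance (frequency_of_completed_tasks : List (String × Int)) (out : Int × List String) : Decidable (Spec_most_user_points frequency_of_completed_tasks out) := by unfold Spec_most_user_points; infer_instance

-- ===== CLAIM (what is proved, stated in full; the proofs are below) =====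
def Claim_equal_most_user_points : Prop := ∀ (frequency_of_completed_tasks : List (String × Int)), Dom_most_user_points frequency_of_completed_tasks → Pre_most_user_points frequency_of_completed_tasks → Spec_most_user_points frequency_of_completed_tasks (most_user_points frequency_of_completed_tasks)

-- ===== LEMMAS AND PROOFS =====

-- loop invariant of B: from state some (b, us), the fold ends with the running max M of b and the tail,
-- and the users list is the (kept-iff-still-maximal) prefix users plus the tail's users scoring M
theorem pvStepB_inv (l : List (String × Int)) : ∀ (b : Int) (us : List String),
    l.foldl pvStepB (some (b, us)) =
      some (l.foldl (fun m p => max m p.2) b,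
        (if l.foldl (fun m p => max m p.2) b = b then us else []) ++
          (l.filter (fun p => p.2 == l.foldl (fun m p => max m p.2) b)).map Prod.fst) := by
  induction l with
  | nil => intro b us; simp
  | cons hd tl ih =>
    intro b us
    have hM : ∀ b' : Int, b' ≤ tl.foldl (fun m p => max m p.2) b' :=
      fun b' => (PySem.List.le_foldl_max_int tl Prod.snd b').1
    by_cases h1 : hd.2 > b
    · have hstep : pvStepB (some (b, us)) hd = some (hd.2, [hd.1]) := by
        simp [pvStepB, h1]
      have hmx : max b hd.2 = hd.2 := max_eq_right (le_of_lt h1)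
      simp only [List.foldl_cons]
      rw [hstep, ih hd.2 [hd.1]]
      simp only [hmx]
      have hne : ¬ (tl.foldl (fun m p => max m p.2) hd.2 = b) := by
        have := hM hd.2; omega
      clear ih hM
      rw [List.filter_cons]
      by_cases h2 : List.foldl (fun m p => max m p.2) hd.2 tl = hd.2
      · simp [h2]
        intro h; omega
      · have h2' : ¬ (hd.2 = List.foldl (fun m p => max m p.2) hd.2 tl) := fun h => h2 h.symm
        simp [h2, h2', hne]
    · by_cases h2 : hd.2 = b
      · have hstep : pvStepB (some (b, us)) hd = some (b, us ++ [hd.1]) := by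
          simp [pvStepB, h2]
        have hmx : max b hd.2 = b := by omega
        simp only [List.foldl_cons]
        rw [hstep, ih b (us ++ [hd.1])]
        simp only [hmx]
        rw [List.filter_cons]
        by_cases h3 : List.foldl (fun m p => max m p.2) b tl = b
        · simp [h3, h2]
        · have h3' : ¬ (hd.2 = List.foldl (fun m p => max m p.2) b tl) := by
            rw [h2]; exact fun h => h3 h.symm
          simp [h3, h3']
      · have hstep : pvStepB (some (b, us)) hd = some (b, us) := by
          simp [pvStepB, h2]; omega
        have hmx : max b hd.2 = b := by omega
        simp only [List.foldl_cons]
        rw [hstep, ih b us]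
        simp only [hmx]
        have hne : ¬ (hd.2 = tl.foldl (fun m p => max m p.2) b) := by
          have := hM b; omega
        rw [List.filter_cons]
        simp [hne]

-- A's filtering pass is List.filter + map
theorem pvFilterA (l : List (String × Int)) (m : Int) : ∀ acc : List String,
    l.foldl (fun acc p => if p.2 == m then acc ++ [p.1] else acc) acc =
      acc ++ (l.filter (fun p => p.2 == m)).map Prod.fst := by
  induction l with
  | nil => simp
  | cons hd tl ih =>
    intro acc
    simp only [List.foldl_cons, List.filter_cons]
    by_cases h : (hd.2 == m) = true
    · rw [if_pos h, ih, if_pos h]; simp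
    · rw [if_neg h, ih, if_neg h]

theorem most_user_points_eq (hd : String × Int) (tl : List (String × Int)) :
    most_user_points (hd :: tl) = most_user_points_alt (hd :: tl) := by
  unfold most_user_points most_user_points_alt
  rw [show (hd :: tl).foldl pvStepB none = tl.foldl pvStepB (some (hd.2, [hd.1])) from rfl]
  rw [pvStepB_inv tl hd.2 [hd.1]]
  rw [show (hd :: tl).map Prod.snd = hd.2 :: tl.map Prod.snd from rfl]
  rw [PySem.List.max?_id_cons]
  have hfold : (tl.map Prod.snd).foldl max hd.2 = tl.foldl (fun m p => max m p.2) hd.2 := by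
    rw [List.foldl_map]
  simp only [Option.getD_some, hfold]
  rw [pvFilterA (hd :: tl) (tl.foldl (fun m p => max m p.2) hd.2) []]
  simp only [List.nil_append, List.filter_cons]
  by_cases h : tl.foldl (fun m p => max m p.2) hd.2 = hd.2
  · simp [h]
  · have h' : ¬ (hd.2 == tl.foldl (fun m p => max m p.2) hd.2) = true := by
      simp; omega
    simp [h, h']

-- ===== VERDICT (by name: the statement is the Claim_ definition above) =====
theorem most_user_points_spec : Claim_equal_most_user_points := by
  intro l _ hpre
  match l with
  | [] => exact absurd rfl hpre
  | hd :: tl => exact most_user_points_eq hd tl
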